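-- pv_equiv track=rewrite | github.com/WG-Forge/Team-Segfault | src/entity/tanks/hex_deltas.py | get_ring_coords
-- ===== SOURCE A (Python) =====
-- def get_ring_coords(ring_num: int) -> tuple[tuple[int, int, int]]:
--     # Makes all the possible coordinates in a given ring around (0,0,0)
--     ring_coords = []
--     max_crd = ring_num
--     min_crd = -ring_num
--     required_abs_sum = ring_num*2
--     for i in range(min_crd, max_crd+1):
--         for j in range(max(min_crd, min_crd-i), min(max_crd, max_crd-i)+1):
--             k = -i-j
--             if abs(i) + abs(j) + abs(k) == required_abs_sum:
--                 ring_coords.append((i, j, k))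
--     return tuple(ring_coords)
-- ===== SOURCE B (Python) =====
-- def get_ring_coords(ring_num: int) -> tuple[tuple[int, int, int]]:
--     # Edge-walk: for each i, emit the qualifying j-values directly (closed form)
--     # instead of scanning and testing the whole j range.
--     r = ring_num
--     coords = []
--     for i in range(-r, r + 1):
--         if i == -r:
--             js = range(0, r + 1)
--         elif i == r:
--             js = range(-r, 1)
--         elif i < 0:
--             js = (-r - i, r)
--         else:
--             js = (-r, r - i)
--         for j in js:
--             coords.append((i, j, -i - j))
--     return tuple(coords)
-- ===== Notes on version B (the rewrite author's own statement) =====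
-- stated objective: faster
-- what changed: Instead of scanning the full j range for every i and testing the absolute-coordinate sum, B emits the qualifying j-values for each i directly in closed form (a full edge row at the extreme i values, the two boundary j-values otherwise).
import Mathlib
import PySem

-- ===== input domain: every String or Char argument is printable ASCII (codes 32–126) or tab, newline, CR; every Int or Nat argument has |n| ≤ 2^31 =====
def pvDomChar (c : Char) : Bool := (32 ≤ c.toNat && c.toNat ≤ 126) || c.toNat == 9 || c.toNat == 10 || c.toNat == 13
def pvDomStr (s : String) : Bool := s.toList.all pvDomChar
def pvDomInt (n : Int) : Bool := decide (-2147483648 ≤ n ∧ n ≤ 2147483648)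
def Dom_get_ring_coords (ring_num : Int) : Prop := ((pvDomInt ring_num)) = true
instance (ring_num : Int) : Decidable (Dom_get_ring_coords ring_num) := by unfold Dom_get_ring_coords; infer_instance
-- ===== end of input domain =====

-- B emits each row's qualifying j-values directly in closed form instead of
-- scanning and testing A's whole j range; faster, return value proved identical.

-- ===== PORT A =====
def get_ring_coords (ring_num : Int) : List (Int × Int × Int) :=
  let max_crd := ring_num
  let min_crd := -ring_num
  let required_abs_sum := ring_num * 2
  (PySem.List.pyRange min_crd (max_crd + 1)).foldl (fun acc i =>
    (PySem.List.pyRange (max min_crd (min_crd - i)) (min max_crd (max_crd - i) + 1)).foldl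
      (fun acc2 j =>
        let k := -i - j
        if |i| + |j| + |k| = required_abs_sum then acc2 ++ [(i, j, k)] else acc2)
      acc) []

-- ===== PORT B =====
-- the closed-form list of qualifying j-values for row i of ring r
def altJs (r i : Int) : List Int :=
  if i = -r then PySem.List.pyRange 0 (r + 1)
  else if i = r then PySem.List.pyRange (-r) 1
  else if i < 0 then [-r - i, r]
  else [-r, r - i]

def get_ring_coords_alt (ring_num : Int) : List (Int × Int × Int) :=
  let r := ring_num
  (PySem.List.pyRange (-r) (r + 1)).foldl (fun acc i =>
    (altJs r i).foldl (fun acc2 j => acc2 ++ [(i, j, -i - j)]) acc) []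

-- ===== PRECONDITION & SPEC =====
def Spec_get_ring_coords (ring_num : Int) (out : List (Int × Int × Int)) : Prop := out = get_ring_coords_alt ring_num
instance (ring_num : Int) (out : List (Int × Int × Int)) : Decidable (Spec_get_ring_coords ring_num out) := by unfold Spec_get_ring_coords; infer_instance

-- ===== CLAIM (what is proved, stated in full; the proofs are below) =====
def Claim_equal_get_ring_coords : Prop := ∀ (ring_num : Int), Dom_get_ring_coords ring_num → Spec_get_ring_coords ring_num (get_ring_coords ring_num)

-- ===== LEMMAS AND PROOFS =====

-- A's inner scan-and-test over the j range keeps exactly B's closed-form j list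
lemma filter_eq_altJs (r i : Int) (h1 : -r ≤ i) (h2 : i ≤ r) :
    (PySem.List.pyRange (max (-r) (-r - i)) (min r (r - i) + 1)).filter
      (fun j => decide (|i| + |j| + |(-i - j)| = r * 2)) = altJs r i := by
  have hr : 0 ≤ r := by omega
  by_cases hneg : i = -r
  · subst hneg
    rw [show max (-r) (-r - -r) = 0 by omega, show min r (r - -r) = r by omega]
    unfold altJs
    rw [if_pos rfl]
    apply List.filter_eq_self.mpr
    intro j hj
    rw [PySem.List.mem_pyRange_one] at hj
    simp only [decide_eq_true_eq, Int.abs_eq_natAbs]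
    omega
  · by_cases hpos : i = r
    · rw [show max (-r) (-r - i) = -r by omega, show min r (r - i) = 0 by omega]
      unfold altJs
      rw [if_neg hneg, if_pos hpos]
      apply List.filter_eq_self.mpr
      intro j hj
      rw [PySem.List.mem_pyRange_one] at hj
      simp only [decide_eq_true_eq, Int.abs_eq_natAbs]
      omega
    · -- -r < i < r: exactly the two endpoint j-values qualify, none strictly between
      by_cases hi0 : i < 0
      · rw [show max (-r) (-r - i) = -r - i by omega, show min r (r - i) = r by omega]
        unfold altJs
        rw [if_neg hneg, if_neg hpos, if_pos hi0]
        rw [PySem.List.pyRange_one_append (-r - i) (-r - i + 1) (r + 1) (by omega) (by omega),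
            PySem.List.pyRange_one_append (-r - i + 1) r (r + 1) (by omega) (by omega),
            PySem.List.pyRange_one_singleton, PySem.List.pyRange_one_singleton]
        rw [List.filter_append, List.filter_append]
        rw [(List.filter_eq_self (l := [-r - i])).mpr (by
              intro j hj
              simp only [List.mem_singleton] at hj
              subst hj
              simp only [decide_eq_true_eq, Int.abs_eq_natAbs]
              omega)]
        rw [(List.filter_eq_self (l := [r])).mpr (by
              intro j hj
              simp only [List.mem_singleton] at hj
              subst hj
              simp only [decide_eq_true_eq, Int.abs_eq_natAbs]
              omega)]
        rw [List.filter_eq_nil_iff.mpr (by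
              intro j hj
              rw [PySem.List.mem_pyRange_one] at hj
              simp only [decide_eq_true_eq, Int.abs_eq_natAbs]
              omega)]
        rfl
      · rw [show max (-r) (-r - i) = -r by omega, show min r (r - i) = r - i by omega]
        unfold altJs
        rw [if_neg hneg, if_neg hpos, if_neg hi0]
        rw [PySem.List.pyRange_one_append (-r) (-r + 1) (r - i + 1) (by omega) (by omega),
            PySem.List.pyRange_one_append (-r + 1) (r - i) (r - i + 1) (by omega) (by omega),
            PySem.List.pyRange_one_singleton, PySem.List.pyRange_one_singleton]
        rw [List.filter_append, List.filter_append]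
        rw [(List.filter_eq_self (l := [-r])).mpr (by
              intro j hj
              simp only [List.mem_singleton] at hj
              subst hj
              simp only [decide_eq_true_eq, Int.abs_eq_natAbs]
              omega)]
        rw [(List.filter_eq_self (l := [r - i])).mpr (by
              intro j hj
              simp only [List.mem_singleton] at hj
              subst hj
              simp only [decide_eq_true_eq, Int.abs_eq_natAbs]
              omega)]
        rw [List.filter_eq_nil_iff.mpr (by
              intro j hj
              rw [PySem.List.mem_pyRange_one] at hj
              simp only [decide_eq_true_eq, Int.abs_eq_natAbs]
              omega)]
        rfl

lemma ports_agree (r : Int) : get_ring_coords r = get_ring_coords_alt r := by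
  show (PySem.List.pyRange (-r) (r + 1)).foldl _ [] = (PySem.List.pyRange (-r) (r + 1)).foldl _ []
  apply PySem.List.foldl_congr_mem
  intro acc i hi
  rw [PySem.List.mem_pyRange_one] at hi
  have hstep : (fun (acc2 : List (Int × Int × Int)) (j : Int) =>
        let k := -i - j
        if |i| + |j| + |k| = r * 2 then acc2 ++ [(i, j, k)] else acc2)
      = (fun acc2 j =>
        if (fun j => decide (|i| + |j| + |(-i - j)| = r * 2)) j = true
        then acc2 ++ [(i, j, -i - j)] else acc2) := by
    funext acc2 j
    simp
  rw [hstep, PySem.List.foldl_append_if, PySem.List.foldl_append_singleton_eq_map,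
      filter_eq_altJs r i hi.1 (by omega)]

-- ===== VERDICT (by name: the statement is the Claim_ definition above) =====
theorem get_ring_coords_spec : Claim_equal_get_ring_coords := by
  intro r _
  unfold Spec_get_ring_coords
  exact ports_agree r
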